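-- pv_equiv track=rewrite | github.com/oski89/AoC | 2017/day-09.py | group_score
-- ===== SOURCE A (Python) =====
-- def group_score(in_string):
--     value = 0
--     score = 0
--     new_string = in_string.replace(',', '')
--     for c in new_string:
--         if c == '{':
--             value += 1
--             score += value
--         else:
--             value -= 1
--     return score
-- ===== SOURCE B (Python) =====
-- def group_score(in_string):
--     chars = [c for c in in_string if c != ',']
--     depths = []
--     depth = 0
--     for c in chars:
--         depth += 1 if c == '{' else -1
--         depths.append(depth)
--     return sum(d for d, c in zip(depths, chars) if c == '{')
-- ===== Notes on version B (the rewrite author's own statement) =====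
-- stated objective: alternative
-- what changed: Instead of A's single fused loop updating depth and score together, B first materializes the running-depth prefix-sum table and then, in a separate filtered reduction, sums the depth at every opening-brace position.
import Mathlib
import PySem

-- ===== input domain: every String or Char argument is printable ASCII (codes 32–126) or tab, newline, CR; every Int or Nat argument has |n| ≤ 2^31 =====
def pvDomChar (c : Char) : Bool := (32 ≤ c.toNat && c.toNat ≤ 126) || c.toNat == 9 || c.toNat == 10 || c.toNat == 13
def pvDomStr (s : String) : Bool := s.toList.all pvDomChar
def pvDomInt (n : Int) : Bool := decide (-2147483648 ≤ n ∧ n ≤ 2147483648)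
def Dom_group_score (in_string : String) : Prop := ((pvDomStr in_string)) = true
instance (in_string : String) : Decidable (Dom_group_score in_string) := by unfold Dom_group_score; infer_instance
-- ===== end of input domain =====

-- B computes the same score by a different decomposition: a prefix-sum table of depths, then a filtered sum.

-- ===== PORT A =====
def group_score (in_string : String) : Int :=
  let new_string := PySem.Str.replace in_string "," ""
  let p := new_string.toList.foldl
    (fun (st : Int × Int) c =>
      if c = '{' then (st.1 + 1, st.2 + (st.1 + 1)) else (st.1 - 1, st.2))
    (0, 0)
  p.2

-- ===== PORT B =====
-- running depth table: depths[i] = depth after reading chars[0..i]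
def pvCumDepths : List Char → Int → List Int
  | [], _ => []
  | c :: cs, t =>
    let t' := t + (if c = '{' then 1 else -1)
    t' :: pvCumDepths cs t'

def group_score_alt (in_string : String) : Int :=
  let chars := in_string.toList.filter (fun c => c ≠ ',')
  let depths := pvCumDepths chars 0
  (((depths.zip chars).filter (fun p => p.2 = '{')).map Prod.fst).sum

-- ===== PRECONDITION & SPEC =====
def Spec_group_score (in_string : String) (out : Int) : Prop := out = group_score_alt in_string
instance (in_string : String) (out : Int) : Decidable (Spec_group_score in_string out) := by unfold Spec_group_score; infer_instance

-- ===== CLAIM (what is proved, stated in full; the proofs are below) =====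
def Claim_equal_group_score : Prop := ∀ (in_string : String), Dom_group_score in_string → Spec_group_score in_string (group_score in_string)

-- ===== LEMMAS AND PROOFS =====

-- zsum cs v = B's filtered sum when the depth counter starts at v
def pvZ (cs : List Char) (v : Int) : Int :=
  ((((pvCumDepths cs v).zip cs).filter (fun p => p.2 = '{')).map Prod.fst).sum

lemma pvZ_cons (c : Char) (cs : List Char) (v : Int) :
    pvZ (c :: cs) v =
      (if c = '{' then (v + 1) + pvZ cs (v + 1) else pvZ cs (v - 1)) := by
  by_cases h : c = '{'
  · simp [pvZ, pvCumDepths, h]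
  · simp only [pvZ, pvCumDepths, if_neg h]
    have : v + -1 = v - 1 := by omega
    simp [this, h]

lemma pvFoldA (cs : List Char) : ∀ (v s : Int),
    (cs.foldl
      (fun (st : Int × Int) c =>
        if c = '{' then (st.1 + 1, st.2 + (st.1 + 1)) else (st.1 - 1, st.2))
      (v, s)).2 = s + pvZ cs v := by
  induction cs with
  | nil => intro v s; simp [pvZ, pvCumDepths]
  | cons c cs ih =>
    intro v s
    rw [List.foldl_cons]
    by_cases h : c = '{'
    · simp only [if_pos h]
      rw [ih, pvZ_cons, if_pos h]; ring
    · simp only [if_neg h]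
      rw [ih, pvZ_cons, if_neg h]

-- the comma-strip: replace "," "" is exactly the filter B performs
lemma pvGo_filter : ∀ (fuel : Nat) (l acc : List Char), l.length ≤ fuel →
    PySem.Chars.replace.go [','] [] fuel l acc
      = acc.reverse ++ l.filter (fun c => c ≠ ',') := by
  intro fuel
  induction fuel with
  | zero =>
    intro l acc h
    have : l = [] := List.eq_nil_of_length_eq_zero (Nat.le_zero.mp h)
    subst this
    simp [PySem.Chars.replace.go]
  | succ n ih =>
    intro l acc h
    cases l with
    | nil => simp [PySem.Chars.replace.go]
    | cons c t =>
      rw [PySem.Chars.replace.go]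
      have ht : t.length ≤ n := by simp at h; omega
      by_cases hc : c = ','
      · subst hc
        have hp : List.isPrefixOf [','] (',' :: t) = true := by
          simp [List.isPrefixOf]
        simp only [hp, if_true, List.length_cons, List.length_nil, List.drop_succ_cons,
          List.drop_zero, List.reverse_nil, List.nil_append]
        rw [ih t acc ht]
        simp
      · have hp : List.isPrefixOf [','] (c :: t) = false := by
          show ((',' == c) && List.isPrefixOf ([] : List Char) t) = false
          have h1 : (',' == c) = false := beq_eq_false_iff_ne.mpr (fun hh => hc hh.symm)
          simp [h1]
        simp only [hp, Bool.false_eq_true, if_false]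
        rw [ih t (c :: acc) ht]
        simp [hc]

lemma pvReplace_comma (s : String) :
    (PySem.Str.replace s "," "").toList = s.toList.filter (fun c => c ≠ ',') := by
  rw [PySem.Str.toList_replace]
  show PySem.Chars.replace s.toList [','] [] = _
  rw [PySem.Chars.replace]
  simp only [List.isEmpty_cons, Bool.false_eq_true, if_false]
  simpa using pvGo_filter s.toList.length s.toList [] (le_refl _)

-- ===== VERDICT (by name: the statement is the Claim_ definition above) =====
theorem group_score_spec : Claim_equal_group_score := by
  intro s _
  show group_score s = group_score_alt s
  unfold group_score group_score_alt
  simp only [pvReplace_comma, pvFoldA]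
  simp [pvZ]
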